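-- pv_equiv track=rewrite | github.com/igorifaresi/md-abstractions | contagem_sem_repeticao.py | _combinacao
-- ===== SOURCE A (Python) =====
-- def _combinacao(arr):
--     achou_igual = False
--
--     for palavra in arr:
--         for i in range(len(arr)):
--             if set(list(palavra)) == set(list(arr[i])) and palavra != arr[i]:
--                 del arr[i]
--                 achou_igual = True
--                 break
--         if achou_igual == True:
--             break
--
--     if achou_igual == True:
--         return _combinacao(arr)
--     else:
--         return arr
-- ===== SOURCE B (Python) =====
-- # Equivalent, simpler re-implementation: two passes with a dict keyed by the word's
-- # letter-set (as a sorted tuple of its distinct characters) instead of A's repeated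
-- # quadratic scan-delete-and-restart recursion.
-- # Like A, it mutates arr in place (writes the kept words back) and returns arr.
-- def _combinacao(arr):
--     first = {}
--     for w in arr:
--         k = tuple(sorted(set(w)))
--         if k not in first:
--             first[k] = w
--     arr[:] = [w for w in arr if first[tuple(sorted(set(w)))] == w]
--     return arr
-- ===== Notes on version B (the rewrite author's own statement) =====
-- stated objective: faster
-- what changed: Replaces A's recursive restart-after-each-deletion double scan with two linear passes: a dict mapping each letter-set to its first spelling, then a filter keeping words equal to that first spelling.
import Mathlib
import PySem

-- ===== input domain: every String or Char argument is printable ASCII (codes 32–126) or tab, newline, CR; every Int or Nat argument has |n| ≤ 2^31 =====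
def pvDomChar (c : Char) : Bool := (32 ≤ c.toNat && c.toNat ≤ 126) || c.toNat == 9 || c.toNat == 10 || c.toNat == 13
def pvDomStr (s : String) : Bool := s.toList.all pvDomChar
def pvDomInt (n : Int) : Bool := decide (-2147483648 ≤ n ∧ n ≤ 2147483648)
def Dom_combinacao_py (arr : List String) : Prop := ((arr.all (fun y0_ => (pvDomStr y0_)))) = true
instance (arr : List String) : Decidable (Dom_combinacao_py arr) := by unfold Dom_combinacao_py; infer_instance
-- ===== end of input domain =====

-- B replaces A's recursive scan-delete-restart with two passes (letter-set dict, then filter);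
-- both mutate arr in place in Python — the equivalence proved here is about the return value.


-- ===== PORT A =====
-- set(list(palavra)) == set(list(arr[i]))
def pySame (p q : String) : Bool :=
  PySem.Set.equal (PySem.Set.ofList p.toList) (PySem.Set.ofList q.toList)

-- inner 'for i in range(len(arr))' with break: first i with the deletion condition
def innerFind (p : String) (arr : List String) (i : Nat) : Option Nat :=
  if h : i < arr.length then
    if pySame p arr[i] && p != arr[i] then some i
    else innerFind p arr (i + 1)
  else none
termination_by arr.length - i

-- outer 'for palavra in arr' with break on the first deletion
def outerFind : List String → List String → Option Nat
  | [], _ => none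
  | p :: rest, arr =>
    match innerFind p arr 0 with
    | some i => some i
    | none => outerFind rest arr

theorem innerFind_lt {p : String} {arr : List String} {s i : Nat}
    (h : innerFind p arr s = some i) : i < arr.length := by
  fun_induction innerFind p arr s with
  | case1 j hj hc => simp_all; omega
  | case2 j hj hc ih => exact ih h
  | case3 j hj => simp_all

theorem outerFind_lt {rest arr : List String} {i : Nat}
    (h : outerFind rest arr = some i) : i < arr.length := by
  induction rest with
  | nil => simp [outerFind] at h
  | cons p rest ih =>
    simp only [outerFind] at h
    cases hp : innerFind p arr 0 with
    | some j => rw [hp] at h; cases h; exact innerFind_lt hp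
    | none => rw [hp] at h; exact ih h

def combinacao_py (arr : List String) : List String :=
  match hof : outerFind arr arr with
  | some i => combinacao_py (arr.eraseIdx i)     -- del arr[i]; recurse
  | none => arr
termination_by arr.length
decreasing_by
  have := outerFind_lt hof
  simp [List.length_eraseIdx, this]
  omega

-- ===== PORT B =====
-- tuple(sorted(set(w)))
def pyKey (w : String) : List Char :=
  PySem.List.sorted (PySem.Set.ofList w.toList) (fun x => x) false

def combinacao_py_alt (arr : List String) : List String :=
  let first := arr.foldl
    (fun d w => if d.contains (pyKey w) then d else d.insert (pyKey w) w)
    (PySem.Dict.empty)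
  (arr.filter (fun w => first.get? (pyKey w) == some w))

-- ===== PRECONDITION & SPEC =====
def Spec_combinacao_py (arr : List String) (out : List String) : Prop := out = combinacao_py_alt arr
instance (arr : List String) (out : List String) : Decidable (Spec_combinacao_py arr out) := by unfold Spec_combinacao_py; infer_instance

-- ===== CLAIM (what is proved, stated in full; the proofs are below) =====
def Claim_equal_combinacao_py : Prop := ∀ (arr : List String), Dom_combinacao_py arr → Spec_combinacao_py arr (combinacao_py arr)

-- ===== LEMMAS AND PROOFS =====

-- the common characterisation: keep w iff w is the first word of arr with its letter-set
def pvF (arr : List String) : List String :=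
  arr.filter (fun w => (arr.find? (fun x => pyKey x == pyKey w)) == some w)

theorem pySame_iff {u v : String} : pySame u v = true ↔ pyKey u = pyKey v := by
  constructor
  · intro h
    have hm := (PySem.Set.equal_iff _ _).mp h
    have hperm : (PySem.Set.ofList u.toList).Perm (PySem.Set.ofList v.toList) :=
      (List.perm_ext_iff_of_nodup (PySem.Set.nodup_ofList _) (PySem.Set.nodup_ofList _)).mpr
        (fun x => hm x)
    exact PySem.List.sorted_eq_sorted_of_perm _ _ _ (fun a b => id) hperm
  · intro h
    apply (PySem.Set.equal_iff _ _).mpr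
    intro x
    have h1 : x ∈ PySem.Set.ofList u.toList ↔ x ∈ pyKey u := (PySem.List.mem_sorted _ _ _ _).symm
    have h2 : x ∈ PySem.Set.ofList v.toList ↔ x ∈ pyKey v := (PySem.List.mem_sorted _ _ _ _).symm
    rw [h1, h2, h]

theorem innerFind_none' {p : String} {arr : List String} {s : Nat}
    (h : innerFind p arr s = none) :
    ∀ k (hk : k < arr.length), s ≤ k → ¬(pySame p arr[k] = true ∧ arr[k] ≠ p) := by
  fun_induction innerFind p arr s with
  | case1 j hj hc => simp at h
  | case2 j hj hc ih =>
    intro k hk hs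
    rcases Nat.eq_or_lt_of_le hs with rfl | hlt
    · intro hx
      apply hc
      simp only [Bool.and_eq_true, bne_iff_ne, ne_eq]
      exact ⟨hx.1, fun e => hx.2 e.symm⟩
    · exact ih h k hk hlt
  | case3 j hj =>
    intro k hk hs; omega

theorem innerFind_some' {p : String} {arr : List String} {s i : Nat}
    (h : innerFind p arr s = some i) :
    s ≤ i ∧ ∃ (hi : i < arr.length), (pySame p arr[i] = true ∧ arr[i] ≠ p) ∧
      ∀ k (hk : k < arr.length), s ≤ k → k < i → ¬(pySame p arr[k] = true ∧ arr[k] ≠ p) := by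
  fun_induction innerFind p arr s with
  | case1 j hj hc =>
    cases h
    simp only [Bool.and_eq_true, bne_iff_ne, ne_eq] at hc
    exact ⟨le_refl _, hj, ⟨hc.1, fun e => hc.2 e.symm⟩, fun k hk h1 h2 => by omega⟩
  | case2 j hj hc ih =>
    obtain ⟨hle, hi, hcond, hmin⟩ := ih h
    refine ⟨by omega, hi, hcond, ?_⟩
    intro k hk h1 h2
    rcases Nat.eq_or_lt_of_le h1 with rfl | hlt
    · intro hx
      apply hc
      simp only [Bool.and_eq_true, bne_iff_ne, ne_eq]
      exact ⟨hx.1, fun e => hx.2 e.symm⟩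
    · exact hmin k hk hlt h2
  | case3 j hj => simp at h

theorem outerFind_none' {rest arr : List String}
    (h : outerFind rest arr = none) : ∀ p ∈ rest, innerFind p arr 0 = none := by
  induction rest with
  | nil => simp
  | cons p rest ih =>
    simp only [outerFind] at h
    cases hp : innerFind p arr 0 with
    | some j => rw [hp] at h; cases h
    | none =>
      rw [hp] at h
      intro q hq
      rcases List.mem_cons.mp hq with rfl | hq'
      · exact hp
      · exact ih h q hq'

theorem outerFind_some' {rest arr : List String} {i : Nat}
    (h : outerFind rest arr = some i) :
    ∃ r1 p r2, rest = r1 ++ p :: r2 ∧ (∀ q ∈ r1, innerFind q arr 0 = none) ∧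
      innerFind p arr 0 = some i := by
  induction rest with
  | nil => simp [outerFind] at h
  | cons q rest ih =>
    simp only [outerFind] at h
    cases hq : innerFind q arr 0 with
    | some j =>
      rw [hq] at h; cases h
      exact ⟨[], q, rest, rfl, by simp, hq⟩
    | none =>
      rw [hq] at h
      obtain ⟨r1, p, r2, hrest, hnone, hinner⟩ := ih h
      refine ⟨q :: r1, p, r2, by rw [hrest]; rfl, ?_, hinner⟩
      intro x hx
      rcases List.mem_cons.mp hx with rfl | hx'
      · exact hq
      · exact hnone x hx'

-- find? selects the first index where the predicate holds
theorem find?_eq_of_min {α : Type} {l : List α} {q : α → Bool} {m : Nat}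
    (hm : m < l.length) (hq : q l[m] = true)
    (hmin : ∀ k (hk : k < l.length), k < m → q l[k] = false) :
    l.find? q = some l[m] := by
  induction l generalizing m with
  | nil => simp at hm
  | cons a t ih =>
    cases m with
    | zero => simp_all
    | succ m' =>
      have ha : q a = false := hmin 0 (by simp) (by omega)
      rw [List.find?_cons, ha]
      simpa using ih (by simpa using hm) (by simpa using hq)
        (fun k hk hkm => hmin (k+1) (by simpa using hk) (by omega))

-- find? decomposition: everything before the first hit fails the predicate
theorem find?_some_decomp {α : Type} {l : List α} {q : α → Bool} {y : α}
    (h : l.find? q = some y) : ∃ s1 s2, l = s1 ++ y :: s2 ∧ ∀ a ∈ s1, q a = false := by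
  induction l with
  | nil => simp at h
  | cons a t ih =>
    rw [List.find?_cons] at h
    cases ha : q a with
    | true => rw [ha] at h; cases h; exact ⟨[], t, rfl, by simp⟩
    | false =>
      rw [ha] at h
      obtain ⟨s1, s2, rfl, hf⟩ := ih h
      refine ⟨a :: s1, s2, rfl, ?_⟩
      intro x hx
      rcases List.mem_cons.mp hx with rfl | hx'
      · exact ha
      · exact hf x hx'

-- erasing an element on which the predicate fails does not change find?
theorem find?_eraseIdx_of_false {α : Type} {l : List α} {q : α → Bool} {i : Nat}
    (hi : i < l.length) (hf : q l[i] = false) :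
    (l.eraseIdx i).find? q = l.find? q := by
  conv_rhs => rw [← List.take_append_drop i l, ← List.getElem_cons_drop hi]
  rw [List.eraseIdx_eq_take_drop_succ, List.find?_append, List.find?_append,
    List.find?_cons, hf]

theorem pvF_keeps_all {arr : List String}
    (h : outerFind arr arr = none) : pvF arr = arr := by
  have H := outerFind_none' h
  apply List.filter_eq_self.mpr
  intro w hw
  have hissome : (arr.find? (fun x => pyKey x == pyKey w)).isSome :=
    List.find?_isSome.mpr ⟨w, hw, by simp⟩
  obtain ⟨y, hy⟩ := Option.isSome_iff_exists.mp hissome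
  have hyarr : y ∈ arr := List.mem_of_find?_eq_some hy
  have hykey : pyKey y = pyKey w := by simpa using List.find?_some hy
  obtain ⟨k, hk, hkw⟩ := List.mem_iff_getElem.mp hw
  have hyw : y = w := by
    by_contra hne
    apply innerFind_none' (H y hyarr) k hk (Nat.zero_le _)
    constructor
    · exact pySame_iff.mpr (by rw [hykey, hkw])
    · rw [hkw]; exact fun e => hne e.symm
  rw [hyw] at hy
  simp [hy]

theorem pvF_erase {arr : List String} {i : Nat}
    (h : outerFind arr arr = some i) : pvF (arr.eraseIdx i) = pvF arr := by
  obtain ⟨r1, p, r2, harr, hnone, hinner⟩ := outerFind_some' h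
  subst harr
  obtain ⟨-, hi, ⟨hsame_i, hne_i⟩, hmin_i⟩ := innerFind_some' hinner
  -- p sits at index j := r1.length
  have hj : r1.length < (r1 ++ p :: r2).length := by simp
  have hpj : (r1 ++ p :: r2)[r1.length]'hj = p := by
    rw [List.getElem_append_right (le_refl r1.length)]; simp
  -- the first word of the list with p's letter-set is p itself
  have hps : ((r1 ++ p :: r2).find? (fun x => pyKey x == pyKey p)).isSome :=
    List.find?_isSome.mpr ⟨p, by simp, by simp⟩
  obtain ⟨y, hy⟩ := Option.isSome_iff_exists.mp hps
  obtain ⟨s1, s2, hL2, hfail⟩ := find?_some_decomp hy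
  have hqy : pyKey y = pyKey p := by simpa using List.find?_some hy
  have hm : s1.length < (r1 ++ p :: r2).length := by rw [hL2]; simp
  have hym : (r1 ++ p :: r2)[s1.length]'hm = y := by
    rw [List.getElem_of_eq hL2, List.getElem_append_right (le_refl s1.length)]; simp
  have hfailm : ∀ k (hk : k < (r1 ++ p :: r2).length), k < s1.length →
      (fun x => pyKey x == pyKey p) ((r1 ++ p :: r2)[k]'hk) = false := by
    intro k hk hkm
    have hks : k < s1.length := hkm
    have : (r1 ++ p :: r2)[k]'hk = s1[k]'hks := by
      rw [List.getElem_of_eq hL2, List.getElem_append_left hks]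
    rw [this]
    exact hfail _ (List.getElem_mem hks)
  have hmj : s1.length ≤ r1.length := by
    by_contra h'
    have := hfailm r1.length hj (by omega)
    rw [hpj] at this
    simp at this
  have hyp : y = p := by
    rcases eq_or_lt_of_le hmj with heq | hlt
    · have hix : (r1 ++ p :: r2)[s1.length]'hm = (r1 ++ p :: r2)[r1.length]'hj := by
        congr 1
      rw [← hym, hix, hpj]
    · have hyr1 : y ∈ r1 := by
        rw [← hym, List.getElem_append_left hlt]
        exact List.getElem_mem hlt
      have hn := innerFind_none' (hnone y hyr1) r1.length hj (Nat.zero_le _)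
      by_contra hyp'
      exact hn ⟨pySame_iff.mpr (by rw [hqy, hpj]), by rw [hpj]; exact fun e => hyp' e.symm⟩
  rw [hyp] at hy hym
  have hkey_i : pyKey ((r1 ++ p :: r2)[i]'hi) = pyKey p := (pySame_iff.mp hsame_i).symm
  have hmi : s1.length < i := by
    rcases Nat.lt_trichotomy i s1.length with hlt | heq | hgt
    · have := hfailm i hi hlt
      simp only at this
      rw [hkey_i] at this
      simp at this
    · apply absurd hne_i
      simp only [ne_eq, not_not]
      have hix : (r1 ++ p :: r2)[i]'hi = (r1 ++ p :: r2)[s1.length]'hm := by congr 1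
      rw [hix, hym]
    · exact hgt
  -- the erased list still starts its letter-set class at y
  have hm' : s1.length < ((r1 ++ p :: r2).eraseIdx i).length := by
    rw [List.length_eraseIdx]
    split <;> omega
  have hfind' : ((r1 ++ p :: r2).eraseIdx i).find? (fun x => pyKey x == pyKey p) = some p := by
    have he1 : ((r1 ++ p :: r2).eraseIdx i)[s1.length]'hm' = p := by
      rw [List.getElem_eraseIdx_of_lt hm' hmi]; exact hym
    have := find?_eq_of_min hm' (q := fun x => pyKey x == pyKey p)
      (by rw [he1]; simp)
      (fun k hk hkm => by
        rw [List.getElem_eraseIdx_of_lt hk (by omega)]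
        exact hfailm k _ hkm)
    rw [this, he1]
  -- find? is unchanged by the deletion, for every letter-set
  have hall : ∀ w : String, ((r1 ++ p :: r2).eraseIdx i).find? (fun x => pyKey x == pyKey w)
      = (r1 ++ p :: r2).find? (fun x => pyKey x == pyKey w) := by
    intro w
    by_cases hw : pyKey w = pyKey p
    · have hfun : (fun x : String => pyKey x == pyKey w) = (fun x => pyKey x == pyKey p) := by
        funext x; rw [hw]
      rw [hfun, hy, hfind']
    · apply find?_eraseIdx_of_false hi
      rw [hkey_i]
      simp
      exact fun e => hw e.symm
  -- conclude on the filters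
  unfold pvF
  rw [List.filter_congr (fun w _ => by rw [hall w])]
  set P : String → Bool := fun w => ((r1 ++ p :: r2).find? (fun x => pyKey x == pyKey w) == some w) with hP
  have hPi : P ((r1 ++ p :: r2)[i]'hi) = false := by
    rw [hP]
    simp only []
    have hfun : (fun x : String => pyKey x == pyKey ((r1 ++ p :: r2)[i]'hi))
        = (fun x => pyKey x == pyKey p) := by
      funext x; rw [hkey_i]
    rw [hfun, hy]
    simp
    exact fun e => hne_i e.symm
  conv_rhs => rw [← List.take_append_drop i (r1 ++ p :: r2), ← List.getElem_cons_drop hi]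
  rw [List.eraseIdx_eq_take_drop_succ, List.filter_append, List.filter_append, List.filter_cons]
  simp [hPi]

theorem A_eq_pvF (arr : List String) : combinacao_py arr = pvF arr := by
  fun_induction combinacao_py arr with
  | case1 arr i h ih => rw [ih, pvF_erase h]
  | case2 arr h => rw [pvF_keeps_all h]

theorem dict_get?_foldl (l : List String) (d : PySem.Dict (List Char) String) (k : List Char) :
    (l.foldl (fun d w => if d.contains (pyKey w) then d else d.insert (pyKey w) w) d).get? k
      = (d.get? k).or (l.find? (fun x => pyKey x == k)) := by
  induction l generalizing d with
  | nil => simp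
  | cons w l ih =>
    simp only [List.foldl_cons, List.find?_cons]
    by_cases hc : d.contains (pyKey w) = true
    · rw [if_pos hc, ih]
      by_cases hk : pyKey w == k
      · have hk' : pyKey w = k := by simpa using hk
        have : (d.get? k).isSome := by
          rw [← hk']; rw [PySem.Dict.contains_eq_isSome_get?] at hc; exact hc
        obtain ⟨v, hv⟩ := Option.isSome_iff_exists.mp this
        simp [hv, hk]
      · have hkb : (pyKey w == k) = false := by simpa using hk
        simp [hkb]
    · rw [if_neg hc, ih, PySem.Dict.get?_insert]
      by_cases hk : pyKey w = k
      · subst hk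
        have hnone : d.get? (pyKey w) = none := by
          rw [PySem.Dict.contains_eq_isSome_get?] at hc
          simpa using Bool.of_not_eq_true hc
        simp [hnone]
      · have hkb : (pyKey w == k) = false := by simpa using hk
        simp [hkb, Ne.symm hk]

theorem B_eq_pvF (arr : List String) : combinacao_py_alt arr = pvF arr := by
  unfold combinacao_py_alt pvF
  apply List.filter_congr
  intro w _
  rw [dict_get?_foldl arr PySem.Dict.empty (pyKey w)]
  simp [PySem.Dict.get?_empty, Option.or]

-- ===== VERDICT (by name: the statement is the Claim_ definition above) =====
theorem combinacao_py_spec : Claim_equal_combinacao_py := by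
  intro arr _
  unfold Spec_combinacao_py
  rw [A_eq_pvF, B_eq_pvF]
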